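-- pv_equiv track=rewrite | github.com/faradawn/gnn_prefetcher | model_collection/sota.delta_lstm_v2.py | get_lba_to_prefetch
-- ===== SOURCE A (Python) =====
-- def boyer_moore(queue):
--     candidate = None
--     count = 0
--
--     for _, delta in queue:
--         if count == 0:
--             candidate = delta
--             count = 1
--         elif candidate == delta:
--             count += 1
--         else:
--             count -= 1
--
--     # Verify if the candidate is the majority element
--     count = 0
--     for _, delta in queue:
--         if delta == candidate:
--             count += 1
--
--     if count > len(queue) // 2:
--         return candidate
--     else:
--         return None
--
-- def get_lba_to_prefetch(queue):
--     window_size = 4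
--     while window_size <= len(queue):
--         majority_delta = boyer_moore(queue[len(queue) - window_size:])
--         if majority_delta != None:
--             lba_to_prefetch = queue[-1][0] + majority_delta
--             return lba_to_prefetch, majority_delta
--         window_size *= 2
--     return None, None
-- ===== SOURCE B (Python) =====
-- def _majority(window):
--     # direct majority check: first delta whose occurrence count is a strict majority
--     n = len(window)
--     for _, d in window:
--         if 2 * sum(1 for _, e in window if e == d) > n:
--             return d
--     return None
--
-- def get_lba_to_prefetch(queue):
--     window_size = 4
--     while window_size <= len(queue):
--         m = _majority(queue[len(queue) - window_size:])
--         if m is not None: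
--             return queue[-1][0] + m, m
--         window_size *= 2
--     return None, None
-- ===== Notes on version B (the rewrite author's own statement) =====
-- stated objective: simpler
-- what changed: The Boyer-Moore vote-then-verify majority helper is replaced by a direct scan that returns the first delta whose occurrence count is a strict majority of the window (majority elements are unique, so the same value results); the doubling-window loop is kept.
import Mathlib
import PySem

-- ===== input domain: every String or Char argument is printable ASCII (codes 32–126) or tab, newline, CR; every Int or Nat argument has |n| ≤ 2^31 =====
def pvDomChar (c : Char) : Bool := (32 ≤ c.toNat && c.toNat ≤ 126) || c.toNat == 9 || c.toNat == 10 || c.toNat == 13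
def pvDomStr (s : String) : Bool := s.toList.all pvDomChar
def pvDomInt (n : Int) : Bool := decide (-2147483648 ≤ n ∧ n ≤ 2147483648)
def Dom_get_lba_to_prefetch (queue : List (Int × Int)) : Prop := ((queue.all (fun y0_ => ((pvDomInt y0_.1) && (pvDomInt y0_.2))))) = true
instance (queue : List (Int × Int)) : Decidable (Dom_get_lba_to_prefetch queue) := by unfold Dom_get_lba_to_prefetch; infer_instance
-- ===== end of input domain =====

-- B replaces the Boyer–Moore vote-and-verify majority helper by a direct scan for a strict-majority
-- delta (objective: simpler); the doubling-window loop is unchanged. Return value only; no mutation.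

-- ===== PORT A =====
-- one step of the Boyer–Moore voting loop; state = (candidate, count)
def bmStep (s : Option Int × Int) (p : Int × Int) : Option Int × Int :=
  if s.2 = 0 then (some p.2, 1)
  else if s.1 = some p.2 then (s.1, s.2 + 1)
  else (s.1, s.2 - 1)

def boyer_moore (queue : List (Int × Int)) : Option Int :=
  let s := queue.foldl bmStep (none, 0)
  -- verification pass: count = sum over queue of [delta == candidate]
  let cnt := queue.foldl (fun c p => if some p.2 = s.1 then c + 1 else c) (0 : Int)
  if PySem.Int.floordiv (queue.length : Int) 2 < cnt then s.1 else none

-- while window_size <= len(queue) loop; the '0 < ws' guard only makes the recursion total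
-- (the loop is always entered with ws = 4, where it is vacuous)
def gltpLoopA (queue : List (Int × Int)) (ws : Nat) : Option Int × Option Int :=
  if h : 0 < ws ∧ ws ≤ queue.length then
    match boyer_moore (queue.drop (queue.length - ws)) with   -- queue[len(queue)-ws:]
    | some m =>
      (match PySem.List.pyGet? queue (-1) with                -- queue[-1]
       | some p => (some (p.1 + m), some m)
       | none => (none, some m))                              -- unreachable here: queue is nonempty
    | none => gltpLoopA queue (ws * 2)
  else (none, none)
  termination_by queue.length + 1 - ws
  decreasing_by omega

def get_lba_to_prefetch (queue : List (Int × Int)) : Option Int × Option Int :=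
  gltpLoopA queue 4

-- ===== PORT B =====
-- sum(1 for _, e in window if e == d)
def cntD (w : List (Int × Int)) (d : Int) : Int :=
  w.foldl (fun c q => if q.2 = d then c + 1 else c) 0

-- the scan of _majority: first delta whose count is a strict majority of the window
def majScan (w : List (Int × Int)) : List (Int × Int) → Option Int
  | [] => none
  | p :: t => if (w.length : Int) < 2 * cntD w p.2 then some p.2 else majScan w t

def majorityAlt (w : List (Int × Int)) : Option Int := majScan w w

def gltpLoopB (queue : List (Int × Int)) (ws : Nat) : Option Int × Option Int :=
  if h : 0 < ws ∧ ws ≤ queue.length then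
    match majorityAlt (queue.drop (queue.length - ws)) with
    | some m =>
      (match PySem.List.pyGet? queue (-1) with
       | some p => (some (p.1 + m), some m)
       | none => (none, some m))
    | none => gltpLoopB queue (ws * 2)
  else (none, none)
  termination_by queue.length + 1 - ws
  decreasing_by omega

def get_lba_to_prefetch_alt (queue : List (Int × Int)) : Option Int × Option Int :=
  gltpLoopB queue 4

-- ===== PRECONDITION & SPEC =====
def Spec_get_lba_to_prefetch (queue : List (Int × Int)) (out : Option Int × Option Int) : Prop := out = get_lba_to_prefetch_alt queue
instance (queue : List (Int × Int)) (out : Option Int × Option Int) : Decidable (Spec_get_lba_to_prefetch queue out) := by unfold Spec_get_lba_to_prefetch; infer_instance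

-- ===== CLAIM (what is proved, stated in full; the proofs are below) =====
def Claim_equal_get_lba_to_prefetch : Prop := ∀ (queue : List (Int × Int)), Dom_get_lba_to_prefetch queue → Spec_get_lba_to_prefetch queue (get_lba_to_prefetch queue)

-- ===== LEMMAS AND PROOFS =====

/-- number of pairs in `w` whose delta is `d` -/
def cntN (w : List (Int × Int)) (d : Int) : Nat := w.countP (fun q => q.2 == d)

theorem cntN_cons (p : Int × Int) (w : List (Int × Int)) (d : Int) :
    cntN (p :: w) d = (if p.2 = d then 1 else 0) + cntN w d := by
  by_cases h : p.2 = d <;> simp [cntN, List.countP_cons, h] <;> omega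

theorem foldl_cnt (w : List (Int × Int)) (d : Int) :
    ∀ c : Int, w.foldl (fun c q => if q.2 = d then c + 1 else c) c = c + (cntN w d : Int) := by
  induction w with
  | nil => intro c; simp [cntN]
  | cons p t ih =>
    intro c
    simp only [List.foldl_cons, cntN_cons, ih]
    split_ifs <;> push_cast <;> ring

theorem cntD_eq (w : List (Int × Int)) (d : Int) : cntD w d = (cntN w d : Int) := by
  simpa using foldl_cnt w d 0

theorem verify_some (w : List (Int × Int)) (d : Int) :
    w.foldl (fun c p => if some p.2 = some d then c + 1 else c) (0 : Int) = (cntN w d : Int) := by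
  have : (fun (c : Int) (p : Int × Int) => if some p.2 = some d then c + 1 else c)
      = fun c p => if p.2 = d then c + 1 else c := by
    funext c p; simp
  rw [this]; simpa using foldl_cnt w d 0

theorem verify_none (w : List (Int × Int)) :
    ∀ c : Int, w.foldl (fun c p => if some p.2 = (none : Option Int) then c + 1 else c) c = c := by
  induction w with
  | nil => intro c; simp
  | cons p t ih => intro c; simpa using ih c

/-- Boyer–Moore potential -/
def phi (s : Option Int × Int) (x : Int) : Int := if s.1 = some x then s.2 else -s.2

theorem step_bound (s : Option Int × Int) (p : Int × Int) (x : Int) (h : 0 ≤ s.2) :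
    2 * (if p.2 = x then (1 : Int) else 0) + phi s x ≤ 1 + phi (bmStep s p) x := by
  by_cases h0 : s.2 = 0 <;> by_cases hc : s.1 = some p.2 <;> by_cases hx : s.1 = some x <;>
    by_cases hpx : p.2 = x <;>
    simp_all [bmStep, phi] <;> omega

theorem step_nonneg (s : Option Int × Int) (p : Int × Int) (h : 0 ≤ s.2) :
    0 ≤ (bmStep s p).2 := by
  by_cases h0 : s.2 = 0 <;> by_cases hc : s.1 = some p.2 <;> simp_all [bmStep] <;> omega

theorem bm_inv (l : List (Int × Int)) :
    ∀ s : Option Int × Int, 0 ≤ s.2 →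
      0 ≤ (l.foldl bmStep s).2 ∧
      ∀ x : Int, 2 * (cntN l x : Int) + phi s x ≤ l.length + phi (l.foldl bmStep s) x := by
  induction l with
  | nil => intro s hs; exact ⟨hs, fun x => by simp [cntN]⟩
  | cons p t ih =>
    intro s hs
    have hs' := step_nonneg s p hs
    obtain ⟨h1, h2⟩ := ih (bmStep s p) hs'
    refine ⟨by simpa using h1, fun x => ?_⟩
    have hst := step_bound s p x hs
    have ht := h2 x
    simp only [List.foldl_cons] at *
    rw [cntN_cons]
    simp only [List.length_cons]
    push_cast
    split_ifs at hst ⊢ <;> omega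

theorem bm_cand (w : List (Int × Int)) (m : Int) (h : w.length < 2 * cntN w m) :
    (w.foldl bmStep (none, 0)).1 = some m := by
  obtain ⟨h1, h2⟩ := bm_inv w (none, 0) le_rfl
  have hm := h2 m
  by_cases hc : (w.foldl bmStep (none, (0 : Int))).1 = some m
  · exact hc
  · exfalso
    simp [phi, hc] at hm h1
    omega

theorem cnt_pair (w : List (Int × Int)) (a b : Int) (hab : a ≠ b) :
    cntN w a + cntN w b ≤ w.length := by
  induction w with
  | nil => simp [cntN]
  | cons p t ih =>
    rw [cntN_cons, cntN_cons]
    by_cases h1 : p.2 = a <;> by_cases h2 : p.2 = b <;> simp_all <;> omega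

theorem maj_unique (w : List (Int × Int)) (a b : Int)
    (ha : w.length < 2 * cntN w a) (hb : w.length < 2 * cntN w b) : a = b := by
  by_contra hab
  have := cnt_pair w a b hab
  omega

theorem maj_mem (w : List (Int × Int)) (m : Int) (h : w.length < 2 * cntN w m) :
    ∃ p ∈ w, p.2 = m := by
  have hpos : 0 < cntN w m := by
    by_contra hc
    have hle : cntN w m ≤ w.length := List.countP_le_length
    omega
  obtain ⟨p, hp, hpe⟩ := List.countP_pos_iff.mp hpos
  exact ⟨p, hp, by simpa using hpe⟩

theorem scan_finds (w : List (Int × Int)) (m : Int) (hm : w.length < 2 * cntN w m) :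
    ∀ rest : List (Int × Int), (∃ p ∈ rest, p.2 = m) → majScan w rest = some m := by
  intro rest
  induction rest with
  | nil => rintro ⟨p, hp, _⟩; cases hp
  | cons q t ih =>
    rintro ⟨p, hp, hpe⟩
    by_cases ht : (w.length : Int) < 2 * cntD w q.2
    · have hmq : w.length < 2 * cntN w q.2 := by
        rw [cntD_eq] at ht; exact_mod_cast ht
      have hqm := maj_unique w q.2 m hmq hm
      simp only [majScan]
      rw [if_pos ht, hqm]
    · have hq : q.2 ≠ m := by
        intro he
        exact ht (by rw [cntD_eq, he]; exact_mod_cast hm)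
      have hpt : p ∈ t := by
        rcases List.mem_cons.mp hp with hp' | hp'
        · exact absurd (hp' ▸ hpe) hq
        · exact hp'
      simp only [majScan, if_neg ht]
      exact ih ⟨p, hpt, hpe⟩

theorem scan_sound (w : List (Int × Int)) (m : Int) :
    ∀ rest : List (Int × Int), majScan w rest = some m → w.length < 2 * cntN w m := by
  intro rest
  induction rest with
  | nil => intro h; simp [majScan] at h
  | cons q t ih =>
    intro h
    by_cases ht : (w.length : Int) < 2 * cntD w q.2
    · simp only [majScan, if_pos ht, Option.some.injEq] at h
      rw [cntD_eq] at ht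
      subst h
      exact_mod_cast ht
    · exact ih (by simpa [majScan, if_neg ht] using h)

theorem scan_none (w : List (Int × Int)) (hno : ∀ m : Int, ¬ w.length < 2 * cntN w m)
    (rest : List (Int × Int)) : majScan w rest = none := by
  cases hres : majScan w rest with
  | none => rfl
  | some m => exact absurd (scan_sound w m rest hres) (hno m)

theorem window_eq (w : List (Int × Int)) : boyer_moore w = majorityAlt w := by
  unfold boyer_moore majorityAlt
  cases hs1 : (w.foldl bmStep (none, (0 : Int))).1 with
  | none =>
    -- candidate None: verification count is 0, the test fails, and no majority exists
    have hno : ∀ m : Int, ¬ w.length < 2 * cntN w m := by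
      intro m hm
      have := bm_cand w m hm
      rw [hs1] at this; cases this
    have hfd : (0 : Int) ≤ PySem.Int.floordiv (w.length : Int) 2 := by
      rw [PySem.Int.floordiv_eq_ediv_of_pos (by omega)]; positivity
    simp only [hs1, verify_none w 0]
    rw [if_neg (by omega), scan_none w hno w]
  | some c =>
    have hfd : PySem.Int.floordiv (w.length : Int) 2 = ((w.length / 2 : Nat) : Int) :=
      PySem.Int.floordiv_natCast w.length 2
    by_cases hmaj : w.length < 2 * cntN w c
    · have htest : PySem.Int.floordiv (w.length : Int) 2 < (cntN w c : Int) := by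
        rw [hfd]; exact_mod_cast Nat.lt_of_mul_lt_mul_left (a := 2) (by omega)
      simp only [hs1, verify_some w c]
      rw [if_pos htest, scan_finds w c hmaj w (maj_mem w c hmaj)]
    · have hno : ∀ m : Int, ¬ w.length < 2 * cntN w m := by
        intro m hm
        have := bm_cand w m hm
        rw [hs1] at this
        cases this
        exact hmaj hm
      have htest : ¬ PySem.Int.floordiv (w.length : Int) 2 < (cntN w c : Int) := by
        rw [hfd]
        have : ¬ w.length / 2 < cntN w c := by omega
        exact_mod_cast this
      simp only [hs1, verify_some w c]
      rw [if_neg htest, scan_none w hno w]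

theorem loop_eq (queue : List (Int × Int)) (ws : Nat) :
    gltpLoopA queue ws = gltpLoopB queue ws := by
  fun_induction gltpLoopA queue ws with
  | case1 w h m hm p hp =>
    rw [gltpLoopB, dif_pos h, ← window_eq, hm, hp]
  | case2 w h m hm hp =>
    rw [gltpLoopB, dif_pos h, ← window_eq, hm, hp]
  | case3 w h hm ih =>
    rw [gltpLoopB, dif_pos h, ← window_eq, hm, ih]
  | case4 w h =>
    rw [gltpLoopB, dif_neg h]

-- ===== VERDICT (by name: the statement is the Claim_ definition above) =====
theorem get_lba_to_prefetch_spec : Claim_equal_get_lba_to_prefetch := by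
  intro queue _
  unfold Spec_get_lba_to_prefetch get_lba_to_prefetch get_lba_to_prefetch_alt
  exact loop_eq queue 4
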